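-- pv_equiv track=rewrite | github.com/hiraki-uk/discord-wows-bot | gameparams/images.py | create_mod_text
-- ===== SOURCE A (Python) =====
-- def create_mod_text(l:list):
-- 	text = ''
-- 	count = len(l) // 2
-- 	for i in range(count):
-- 		text += ', '.join(l[i*2 : (i+1)*2]) + '\n'
-- 	rmd = len(l) % 2
-- 	for i in range(rmd):
-- 		text += ', '.join(l[count*2:])
-- 	return text
-- ===== SOURCE B (Python) =====
-- def create_mod_text(l:list):
-- 	parts = []
-- 	pending = None
-- 	for x in l:
-- 		if pending is None:
-- 			pending = x
-- 		else:
-- 			parts.append(pending + ', ' + x + '\n')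
-- 			pending = None
-- 	if pending is not None:
-- 		parts.append(pending)
-- 	return ''.join(parts)
-- ===== Notes on version B (the rewrite author's own statement) =====
-- stated objective: idiomatic
-- what changed: Replaces the index-arithmetic len//2 loop with per-pair slicing and repeated string += by a single pass over the elements with a one-element pending buffer, collecting pair lines in a list joined once at the end.
import Mathlib
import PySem

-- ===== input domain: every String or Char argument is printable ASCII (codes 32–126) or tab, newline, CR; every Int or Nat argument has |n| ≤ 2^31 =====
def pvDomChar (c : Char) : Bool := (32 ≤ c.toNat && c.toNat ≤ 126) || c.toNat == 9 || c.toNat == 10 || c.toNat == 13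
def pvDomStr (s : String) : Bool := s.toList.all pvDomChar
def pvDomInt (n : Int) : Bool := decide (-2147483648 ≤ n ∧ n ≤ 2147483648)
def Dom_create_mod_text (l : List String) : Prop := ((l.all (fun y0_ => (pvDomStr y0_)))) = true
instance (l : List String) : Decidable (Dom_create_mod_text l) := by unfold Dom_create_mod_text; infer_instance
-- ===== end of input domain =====

-- B replaces A's len//2 index-arithmetic loop over slices and repeated string
-- concatenation by a single pass with a pending-element buffer collecting pair
-- lines into a list joined once at the end (idiomatic; same O(n) cost).


-- ===== PORT A =====
def create_mod_text (l : List String) : String :=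
  let text : String := ""
  let count : Int := PySem.Int.floordiv (PySem.List.len l) 2
  let text := (PySem.List.pyRange 0 count 1).foldl
    (fun text i =>
      text ++ PySem.Str.join ", " (PySem.List.slice l (some (i * 2)) (some ((i + 1) * 2))) ++ "\n")
    text
  let rmd : Int := PySem.Int.mod (PySem.List.len l) 2
  let text := (PySem.List.pyRange 0 rmd 1).foldl
    (fun text _ =>
      text ++ PySem.Str.join ", " (PySem.List.slice l (some (count * 2)) none))
    text
  text

-- ===== PORT B =====
def create_mod_text_alt (l : List String) : String :=
  let st : List String × Option String :=
    l.foldl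
      (fun (st : List String × Option String) x =>
        match st.2 with
        | none => (st.1, some x)
        | some pending => (st.1 ++ [pending ++ ", " ++ x ++ "\n"], none))
      ([], none)
  let parts : List String :=
    match st.2 with
    | some pending => st.1 ++ [pending]
    | none => st.1
  PySem.Str.join "" parts

-- ===== PRECONDITION & SPEC =====
def Spec_create_mod_text (l : List String) (out : String) : Prop := out = create_mod_text_alt l
instance (l : List String) (out : String) : Decidable (Spec_create_mod_text l out) := by unfold Spec_create_mod_text; infer_instance

-- ===== CLAIM (what is proved, stated in full; the proofs are below) =====
def Claim_equal_create_mod_text : Prop := ∀ (l : List String), Dom_create_mod_text l → Spec_create_mod_text l (create_mod_text l)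

-- ===== LEMMAS AND PROOFS =====

-- common closed form both ports are reduced to: a pair line per two elements, leftover last
def pvChunks : List String → String
  | a :: b :: rest => a ++ ", " ++ b ++ "\n" ++ pvChunks rest
  | [a] => a
  | [] => ""

lemma join_empty_append (xs ys : List String) :
    PySem.Str.join "" (xs ++ ys) = PySem.Str.join "" xs ++ PySem.Str.join "" ys := by
  apply String.ext
  simp [PySem.Str.join]
  induction xs with
  | nil => simp [PySem.Chars.join_nil]
  | cons a t ih =>
    cases t with
    | nil =>
      cases ys with
      | nil => simp [PySem.Chars.join_nil, PySem.Chars.join_singleton]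
      | cons c u => simp [PySem.Chars.join_singleton, PySem.Chars.join_cons_cons] at ih ⊢
    | cons b u => simp [PySem.Chars.join_cons_cons] at ih ⊢; simp [ih]

lemma join_empty_singleton (a : String) : PySem.Str.join "" [a] = a := by
  apply String.ext; simp [PySem.Str.join, PySem.Chars.join_singleton]

lemma join2 (a b : String) : PySem.Str.join ", " [a, b] = a ++ ", " ++ b := by
  simp [PySem.Str.join, PySem.Chars.join_cons_cons, PySem.Chars.join_singleton]
  apply String.ext; simp

lemma foldl_str_prefix {α : Type} (xs : List α) (f : α → String) (x : String) :
    xs.foldl (fun t i => t ++ f i) x = x ++ xs.foldl (fun t i => t ++ f i) "" := by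
  induction xs generalizing x with
  | nil => simp
  | cons a t ih =>
    simp only [List.foldl_cons]
    rw [ih (x ++ f a), ih ("" ++ f a)]
    apply String.ext; simp

-- the step and finish of B's fold, named for the proofs
def pvStep (st : List String × Option String) (x : String) : List String × Option String :=
  match st.2 with
  | none => (st.1, some x)
  | some pending => (st.1 ++ [pending ++ ", " ++ x ++ "\n"], none)

def pvFinish (st : List String × Option String) : String :=
  PySem.Str.join "" (match st.2 with
    | some pending => st.1 ++ [pending]
    | none => st.1)

lemma B_gen (l : List String) (parts : List String) :
    pvFinish (l.foldl pvStep (parts, none)) =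
      PySem.Str.join "" parts ++ pvFinish (l.foldl pvStep ([], none)) := by
  induction l using pvChunks.induct generalizing parts with
  | case3 => simp [pvFinish]; apply String.ext; simp
  | case2 a =>
    simp [pvFinish, pvStep, join_empty_append, join_empty_singleton]
  | case1 a b rest ih =>
    simp only [List.foldl_cons]
    show pvFinish (rest.foldl pvStep (parts ++ [a ++ ", " ++ b ++ "\n"], none)) = _
    rw [ih]
    have : pvStep (pvStep (([] : List String), (none : Option String)) a) b = ([a ++ ", " ++ b ++ "\n"], none) := rfl
    rw [this, ih [a ++ ", " ++ b ++ "\n"], join_empty_append]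
    apply String.ext; simp

lemma B_eq_chunks (l : List String) : create_mod_text_alt l = pvChunks l := by
  show pvFinish (l.foldl pvStep ([], none)) = pvChunks l
  induction l using pvChunks.induct with
  | case3 => simp [pvFinish]; rfl
  | case2 a => simp [pvFinish, pvStep, join_empty_singleton, pvChunks]
  | case1 a b rest ih =>
    simp only [List.foldl_cons]
    show pvFinish (rest.foldl pvStep ([a ++ ", " ++ b ++ "\n"], none)) = _
    rw [B_gen, join_empty_singleton, ih]
    simp [pvChunks]

-- the first-loop body of A on a::b::rest, shifted by one iteration, is the body on rest
lemma shift_fold (a b : String) (rest : List String) (c : ℤ) (init : String) :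
    (PySem.List.pyRange 1 (c+1) 1).foldl
      (fun t i => t ++ PySem.Str.join ", " (PySem.List.slice (a :: b :: rest) (some (i * 2)) (some ((i + 1) * 2))) ++ "\n") init
    = (PySem.List.pyRange 0 c 1).foldl
      (fun t i => t ++ PySem.Str.join ", " (PySem.List.slice rest (some (i * 2)) (some ((i + 1) * 2))) ++ "\n") init := by
  rw [PySem.List.pyRange_one 1 (c+1), PySem.List.pyRange_one 0 c]
  simp only [add_sub_cancel_right, sub_zero, List.foldl_map]
  congr 1
  funext t k
  congr 2
  have h1 : (1 + (k:ℤ)) * 2 = ((2*k+2 : ℕ) : ℤ) := by push_cast; ring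
  have h2 : (1 + (k:ℤ) + 1) * 2 = ((2*k+4 : ℕ) : ℤ) := by push_cast; ring
  have h3 : (0 + (k:ℤ)) * 2 = ((2*k : ℕ) : ℤ) := by push_cast; ring
  have h4 : (0 + (k:ℤ) + 1) * 2 = ((2*k+2 : ℕ) : ℤ) := by push_cast; ring
  rw [h1, h2, h3, h4, PySem.List.slice_natCast, PySem.List.slice_natCast]
  have e2 : 2*k+4 - (2*k+2) = 2 := by omega
  have e3 : (2*k+2) - 2*k = 2 := by omega
  rw [e2, e3]
  have e1 : 2*k+2 = (2*k)+1+1 := by omega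
  rw [e1, List.drop_succ_cons, List.drop_succ_cons]

lemma drop_shift (a b : String) (rest : List String) (c : ℤ) (hc : 0 ≤ c) :
    PySem.List.slice (a :: b :: rest) (some ((c+1) * 2)) none
      = PySem.List.slice rest (some (c * 2)) none := by
  obtain ⟨m, rfl⟩ := Int.eq_ofNat_of_zero_le hc
  have h1 : ((m:ℤ)+1) * 2 = ((2*m+2 : ℕ) : ℤ) := by push_cast; ring
  have h2 : (m:ℤ) * 2 = ((2*m : ℕ) : ℤ) := by push_cast; ring
  rw [h1, h2, PySem.List.slice_from_natCast, PySem.List.slice_from_natCast]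
  have e1 : 2*m+2 = (2*m)+1+1 := by omega
  rw [e1, List.drop_succ_cons, List.drop_succ_cons]

lemma A_cons2 (a b : String) (rest : List String) :
    create_mod_text (a :: b :: rest) = a ++ ", " ++ b ++ "\n" ++ create_mod_text rest := by
  have hm : ∀ m : ℤ, PySem.Int.mod m 2 = m % 2 := by
    intro m; simp only [PySem.Int.mod]; rw [Int.fmod_eq_emod] ; norm_num
  have hlen2 : PySem.List.len (a :: b :: rest) = (rest.length : ℤ) + 2 := by
    simp [PySem.List.len]; ring
  have hlenr : PySem.List.len rest = (rest.length : ℤ) := by simp [PySem.List.len]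
  have hcount : PySem.Int.floordiv ((rest.length : ℤ) + 2) 2
      = PySem.Int.floordiv (rest.length : ℤ) 2 + 1 := by
    simp [PySem.Int.floordiv, Int.fdiv_eq_ediv]; omega
  have hrmd : PySem.Int.mod ((rest.length : ℤ) + 2) 2 = PySem.Int.mod (rest.length : ℤ) 2 := by
    rw [hm, hm]; omega
  simp only [create_mod_text, hlen2, hlenr, hcount, hrmd]
  set c : ℤ := PySem.Int.floordiv (rest.length : ℤ) 2 with hc
  have hc0 : 0 ≤ c := by
    rw [hc]; simp [PySem.Int.floordiv, Int.fdiv_eq_ediv]; omega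
  rw [PySem.List.pyRange_one_cons (show (0:ℤ) < c + 1 by omega)]
  simp only [List.foldl_cons]
  norm_num
  have hslice02 : PySem.List.slice (a :: b :: rest) none (some 2) = [a, b] := by
    rw [PySem.List.slice_to _ (by norm_num)]
    rfl
  rw [hslice02, join2, shift_fold]
  have hbody : (fun (t : String) (i : ℤ) =>
      t ++ PySem.Str.join ", " (PySem.List.slice rest (some (i * 2)) (some ((i + 1) * 2))) ++ "\n")
      = fun (t : String) (i : ℤ) =>
      t ++ (PySem.Str.join ", " (PySem.List.slice rest (some (i * 2)) (some ((i + 1) * 2))) ++ "\n") := by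
    funext t i; apply String.ext; simp
  rw [hbody, foldl_str_prefix (PySem.List.pyRange 0 c)]
  rcases (show ((rest.length : ℤ)) % 2 = 0 ∨ ((rest.length : ℤ)) % 2 = 1 by omega) with h | h <;> rw [h]
  · simp only [PySem.List.pyRange_zero]
    apply String.ext; simp
  · rw [show PySem.List.pyRange 0 1 = [0] from by
        rw [PySem.List.pyRange_one_cons (by norm_num)]; simp]
    simp only [List.foldl_cons, List.foldl_nil]
    rw [drop_shift a b rest c hc0]
    apply String.ext; simp

lemma A_eq_chunks (l : List String) : create_mod_text l = pvChunks l := by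
  induction l using pvChunks.induct with
  | case3 => decide
  | case2 a =>
    show create_mod_text [a] = a
    simp [create_mod_text, PySem.Int.floordiv, PySem.Int.mod, PySem.List.len,
      PySem.List.pyRange_zero, PySem.List.slice, PySem.Str.join, PySem.Chars.join_singleton]
  | case1 a b rest ih => rw [A_cons2, ih]; simp [pvChunks]

-- ===== VERDICT (by name: the statement is the Claim_ definition above) =====
theorem create_mod_text_spec : Claim_equal_create_mod_text := by
  intro l _
  unfold Spec_create_mod_text
  rw [A_eq_chunks, B_eq_chunks]
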